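-- pv_equiv track=rewrite | github.com/vlOxolr/MSBRDM | src/image_to_traj/scripts/image_to_traj.py | order_strokes_by_lefttop_endpoints
-- ===== SOURCE A (Python) =====
-- from typing import Optional, List, Tuple, Dict, Set
--
-- Point = Tuple[int, int]  # (row, col)
--
-- def pick_key_lefttop(p: Point) -> Tuple[int, int]:
--     """
--     Sorting key for 'top-left to bottom-right'.
--     Prioritize left (col) first, then up (row).
--     """
--     return (p[1], p[0])
--
-- def order_strokes_by_lefttop_endpoints(strokes: List[List[Point]]) -> List[List[Point]]:
--     """
--     Ordering rule:
--     - Each stroke has two endpoints: first and last point.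
--     - Pick the globally most 'top-left' endpoint among all remaining strokes.
--     - Append its stroke to ordered list.
--     - Remove that stroke from future consideration.
--     - Orient the stroke so that the chosen endpoint becomes the first point.
--     """
--     remaining = list(range(len(strokes)))
--     ordered: List[List[Point]] = []
--
--     while len(remaining) > 0:
--         best = None  # (key, stroke_index_in_remaining_list, endpoint_is_start_bool)
--         for ridx, sid in enumerate(remaining):
--             st = strokes[sid]
--             if len(st) == 0:
--                 continue
--             p0 = st[0]
--             p1 = st[-1]
--
--             k0 = pick_key_lefttop(p0)
--             k1 = pick_key_lefttop(p1)
--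
--             if best is None or k0 < best[0]:
--                 best = (k0, ridx, True)
--             if best is None or k1 < best[0]:
--                 best = (k1, ridx, False)
--
--         if best is None:
--             break
--
--         _, ridx, is_start = best
--         sid = remaining[ridx]
--         st = strokes[sid]
--
--         if not is_start:
--             st = st[::-1]
--
--         ordered.append(st)
--         remaining.pop(ridx)
--
--     return ordered
-- ===== SOURCE B (Python) =====
-- from typing import List, Tuple
--
-- Point = Tuple[int, int]  # (row, col)
--
--
-- def order_strokes_by_lefttop_endpoints(strokes: List[List[Point]]) -> List[List[Point]]:
--     # One pass: orient each non-empty stroke toward its more top-left endpoint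
--     # and record that endpoint's key; then one stable sort by the key.
--     keyed = []
--     for st in strokes:
--         if not st:
--             continue
--         k0 = (st[0][1], st[0][0])
--         k1 = (st[-1][1], st[-1][0])
--         if k1 < k0:
--             keyed.append((k1, st[::-1]))
--         else:
--             keyed.append((k0, st))
--     keyed.sort(key=lambda t: t[0])
--     return [st for _, st in keyed]
-- ===== Notes on version B (the rewrite author's own statement) =====
-- stated objective: faster
-- what changed: Replaces the quadratic repeated scan-for-global-minimum selection loop with a single pass that computes each non-empty stroke's oriented form and min-endpoint key, followed by one stable sort by that key.
import Mathlib
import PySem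

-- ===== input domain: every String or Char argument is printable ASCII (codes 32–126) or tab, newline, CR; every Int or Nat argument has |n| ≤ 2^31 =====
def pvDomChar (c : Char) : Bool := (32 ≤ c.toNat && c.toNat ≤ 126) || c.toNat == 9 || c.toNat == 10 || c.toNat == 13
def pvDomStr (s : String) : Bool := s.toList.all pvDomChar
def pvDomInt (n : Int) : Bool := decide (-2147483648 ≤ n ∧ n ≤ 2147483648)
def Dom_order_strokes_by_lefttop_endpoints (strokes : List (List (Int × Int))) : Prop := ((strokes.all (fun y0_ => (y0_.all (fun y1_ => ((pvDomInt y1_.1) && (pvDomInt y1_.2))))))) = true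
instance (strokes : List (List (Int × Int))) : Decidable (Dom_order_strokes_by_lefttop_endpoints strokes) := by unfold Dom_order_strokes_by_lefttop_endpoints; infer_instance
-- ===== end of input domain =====

-- B replaces A's quadratic repeated scan-for-the-global-minimum selection loop by one
-- orient-and-key pass plus a single stable sort (objective: faster, asymptotic).

-- Python's '<' on int 2-tuples (lexicographic); used by both sources via tuple comparison.
def pvKeyLT (a b : Int × Int) : Bool := a.1 < b.1 || (a.1 == b.1 && a.2 < b.2)

-- ===== PORT A =====
-- pick_key_lefttop(p) = (p[1], p[0])
def pick_key_lefttop (p : Int × Int) : Int × Int := (p.2, p.1)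

-- the inner 'for ridx, sid in enumerate(remaining)' loop, carrying ridx and best.
-- st[0] / st[-1] are read with pyGetD and an unreachable default (the branch guards len(st) == 0).
def pvInnerA (strokes : List (List (Int × Int))) : Int → List Int → Option ((Int × Int) × Int × Bool) → Option ((Int × Int) × Int × Bool)
  | _, [], best => best
  | ridx, sid :: rest, best =>
      let st := PySem.List.pyGetD strokes sid []
      if st.length = 0 then pvInnerA strokes (ridx + 1) rest best
      else
        let p0 := PySem.List.pyGetD st 0 (0, 0)
        let p1 := PySem.List.pyGetD st (-1) (0, 0)
        let k0 := pick_key_lefttop p0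
        let k1 := pick_key_lefttop p1
        -- if best is None or k0 < best[0]
        let best1 := match best with
          | none => some (k0, ridx, true)
          | some b => if pvKeyLT k0 b.1 then some (k0, ridx, true) else some b
        -- if best is None or k1 < best[0]
        let best2 := match best1 with
          | none => some (k1, ridx, false)
          | some b => if pvKeyLT k1 b.1 then some (k1, ridx, false) else some b
        pvInnerA strokes (ridx + 1) rest best2

-- the outer 'while len(remaining) > 0' loop (pop? none-branch is an unreachable totality guard)
def pvLoopA (strokes : List (List (Int × Int))) (remaining : List Int) (ordered : List (List (Int × Int))) : List (List (Int × Int)) :=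
  if remaining.length = 0 then ordered
  else
    match pvInnerA strokes 0 remaining none with
    | none => ordered
    | some (_, ridx, is_start) =>
      let sid := PySem.List.pyGetD remaining ridx 0
      let st := PySem.List.pyGetD strokes sid []
      let st' := if is_start then st else (PySem.List.slice? st none none (-1)).getD []
      match h : PySem.List.pop? remaining ridx with
      | none => ordered
      | some r => pvLoopA strokes r.2 (ordered ++ [st'])
termination_by remaining.length
decreasing_by
  have := PySem.List.length_of_pop?_eq_some _ h; omega

def order_strokes_by_lefttop_endpoints (strokes : List (List (Int × Int))) : List (List (Int × Int)) :=
  pvLoopA strokes (PySem.List.pyRange 0 strokes.length 1) []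

-- ===== PORT B =====
def order_strokes_by_lefttop_endpoints_alt (strokes : List (List (Int × Int))) : List (List (Int × Int)) :=
  let keyed := strokes.foldl (fun acc st =>
    if st.length = 0 then acc
    else
      let p0 := PySem.List.pyGetD st 0 (0, 0)
      let p1 := PySem.List.pyGetD st (-1) (0, 0)
      let k0 := (p0.2, p0.1)
      let k1 := (p1.2, p1.1)
      if pvKeyLT k1 k0 then acc ++ [(k1, (PySem.List.slice? st none none (-1)).getD [])]
      else acc ++ [(k0, st)]) []
  (PySem.List.sorted2 keyed (fun t => t.1.1) (fun t => t.1.2)).map (fun t => t.2)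

-- ===== PRECONDITION & SPEC =====
def Spec_order_strokes_by_lefttop_endpoints (strokes : List (List (Int × Int))) (out : List (List (Int × Int))) : Prop := out = order_strokes_by_lefttop_endpoints_alt strokes
instance (strokes : List (List (Int × Int))) (out : List (List (Int × Int))) : Decidable (Spec_order_strokes_by_lefttop_endpoints strokes out) := by unfold Spec_order_strokes_by_lefttop_endpoints; infer_instance

-- ===== CLAIM (what is proved, stated in full; the proofs are below) =====
def Claim_equal_order_strokes_by_lefttop_endpoints : Prop := ∀ (strokes : List (List (Int × Int))), Dom_order_strokes_by_lefttop_endpoints strokes → Spec_order_strokes_by_lefttop_endpoints strokes (order_strokes_by_lefttop_endpoints strokes)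

-- ===== LEMMAS AND PROOFS =====

-- ---- order facts about the lexicographic key comparison ----
theorem pvKeyLT_irrefl (a : Int × Int) : pvKeyLT a a = false := by simp [pvKeyLT]

theorem pvKeyLT_asymm {a b : Int × Int} (h : pvKeyLT a b = true) : pvKeyLT b a = false := by
  simp [pvKeyLT] at *; omega

theorem pvKeyLT_trans {a b c : Int × Int} (h1 : pvKeyLT a b = true) (h2 : pvKeyLT b c = true) :
    pvKeyLT a c = true := by
  simp [pvKeyLT] at *; omega

theorem pvKeyLT_total {a b c : Int × Int} (h : pvKeyLT a c = true) :
    pvKeyLT a b = true ∨ pvKeyLT b c = true := by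
  simp [pvKeyLT] at *; omega

-- ---- generic stable-insertion-sort facts (foldl of insertBy) ----
theorem pv_mem_foldl_insertBy {α : Type} (before : α → α → Bool) :
    ∀ (l acc : List α) (x : α), x ∈ List.foldl (fun acc y => PySem.List.insertBy before y acc) acc l →
      x ∈ acc ∨ x ∈ l := by
  intro l
  induction l with
  | nil => intro acc x h; exact Or.inl h
  | cons y ys ih =>
    intro acc x h
    rcases ih _ x h with h' | h'
    · rcases (PySem.List.mem_insertBy _ _ _ _).1 h' with rfl | h''
      · exact Or.inr (List.mem_cons_self)
      · exact Or.inl h''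
    · exact Or.inr (List.mem_cons_of_mem _ h')

theorem pv_insertBy_min {α : Type} (before : α → α → Bool) (m : α) :
    ∀ (acc : List α), (∀ x ∈ acc, before m x = true) →
      PySem.List.insertBy before m acc = m :: acc := by
  intro acc h
  cases acc with
  | nil => rfl
  | cons y ys => simp [PySem.List.insertBy, h y List.mem_cons_self]

theorem pv_foldl_insertBy_cons_min {α : Type} (before : α → α → Bool) (m : α) :
    ∀ (bs acc : List α), (∀ y ∈ bs, before y m = false) →
      List.foldl (fun acc y => PySem.List.insertBy before y acc) (m :: acc) bs =
        m :: List.foldl (fun acc y => PySem.List.insertBy before y acc) acc bs := by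
  intro bs
  induction bs with
  | nil => intro acc _; rfl
  | cons y ys ih =>
    intro acc h
    have hy : before y m = false := h y List.mem_cons_self
    have : PySem.List.insertBy before y (m :: acc) = m :: PySem.List.insertBy before y acc := by
      simp [PySem.List.insertBy, hy]
    simp only [List.foldl_cons, this]
    exact ih _ (fun z hz => h z (List.mem_cons_of_mem _ hz))

-- stable sort extracts the first minimal element
theorem pv_sort_sel {α : Type} (before : α → α → Bool) (as bs : List α) (m : α)
    (has : ∀ x ∈ as, before m x = true) (hbs : ∀ y ∈ bs, before y m = false) :
    List.foldl (fun acc y => PySem.List.insertBy before y acc) [] (as ++ m :: bs) =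
      m :: List.foldl (fun acc y => PySem.List.insertBy before y acc) [] (as ++ bs) := by
  have hmem : ∀ x ∈ List.foldl (fun acc y => PySem.List.insertBy before y acc) ([] : List α) as, before m x = true := by
    intro x hx
    rcases pv_mem_foldl_insertBy before as [] x hx with h | h
    · simp at h
    · exact has x h
  calc List.foldl (fun acc y => PySem.List.insertBy before y acc) [] (as ++ m :: bs)
      = List.foldl (fun acc y => PySem.List.insertBy before y acc)
          (PySem.List.insertBy before m (List.foldl (fun acc y => PySem.List.insertBy before y acc) [] as)) bs := by
        rw [List.foldl_append]; rfl
    _ = List.foldl (fun acc y => PySem.List.insertBy before y acc)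
          (m :: List.foldl (fun acc y => PySem.List.insertBy before y acc) [] as) bs := by
        rw [pv_insertBy_min before m _ hmem]
    _ = m :: List.foldl (fun acc y => PySem.List.insertBy before y acc)
          (List.foldl (fun acc y => PySem.List.insertBy before y acc) [] as) bs := by
        rw [pv_foldl_insertBy_cons_min before m bs _ hbs]
    _ = m :: List.foldl (fun acc y => PySem.List.insertBy before y acc) [] (as ++ bs) := by
        rw [List.foldl_append]

-- ---- per-stroke oriented item and keyed lists ----
def pvK0 (st : List (Int × Int)) : Int × Int :=
  ((PySem.List.pyGetD st 0 (0, 0)).2, (PySem.List.pyGetD st 0 (0, 0)).1)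

def pvK1 (st : List (Int × Int)) : Int × Int :=
  ((PySem.List.pyGetD st (-1) (0, 0)).2, (PySem.List.pyGetD st (-1) (0, 0)).1)

def pvRev (st : List (Int × Int)) : List (Int × Int) :=
  (PySem.List.slice? st none none (-1)).getD []

def pvItem (st : List (Int × Int)) : (Int × Int) × List (Int × Int) :=
  if pvKeyLT (pvK1 st) (pvK0 st) then (pvK1 st, pvRev st) else (pvK0 st, st)

def pvGetS (strokes : List (List (Int × Int))) (sid : Int) : List (Int × Int) :=
  PySem.List.pyGetD strokes sid []

def pvMk (strokes : List (List (Int × Int))) (sid : Int) : Int × Int :=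
  (pvItem (pvGetS strokes sid)).1

def pvIsStart (strokes : List (List (Int × Int))) (sid : Int) : Bool :=
  !pvKeyLT (pvK1 (pvGetS strokes sid)) (pvK0 (pvGetS strokes sid))

theorem pvMk_eq (strokes : List (List (Int × Int))) (sid : Int) :
    pvMk strokes sid =
      if pvKeyLT (pvK1 (pvGetS strokes sid)) (pvK0 (pvGetS strokes sid))
      then pvK1 (pvGetS strokes sid) else pvK0 (pvGetS strokes sid) := by
  unfold pvMk pvItem; split <;> rfl

theorem pvItem_snd (st : List (Int × Int)) :
    (pvItem st).2 = if pvKeyLT (pvK1 st) (pvK0 st) then pvRev st else st := by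
  unfold pvItem; split <;> rfl

def pvKeyed (strokes : List (List (Int × Int))) (rem : List Int) : List ((Int × Int) × List (Int × Int)) :=
  rem.filterMap (fun sid =>
    if (pvGetS strokes sid).length = 0 then none else some (pvItem (pvGetS strokes sid)))

def pvBefore (t u : (Int × Int) × List (Int × Int)) : Bool := pvKeyLT t.1 u.1

def pvSort (l : List ((Int × Int) × List (Int × Int))) : List ((Int × Int) × List (Int × Int)) :=
  List.foldl (fun acc y => PySem.List.insertBy pvBefore y acc) [] l

theorem pvKeyed_append (strokes : List (List (Int × Int))) (xs ys : List Int) :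
    pvKeyed strokes (xs ++ ys) = pvKeyed strokes xs ++ pvKeyed strokes ys := by
  simp [pvKeyed]

theorem pvKeyed_cons_ne (strokes : List (List (Int × Int))) (m : Int) (bs : List Int)
    (h : (pvGetS strokes m).length ≠ 0) :
    pvKeyed strokes (m :: bs) = pvItem (pvGetS strokes m) :: pvKeyed strokes bs := by
  have h' : ¬ (pvGetS strokes m).length = 0 := h
  simp only [pvKeyed, List.filterMap_cons, if_neg h']

theorem pvKeyed_mem (strokes : List (List (Int × Int))) (rem : List Int) (x : (Int × Int) × List (Int × Int))
    (hx : x ∈ pvKeyed strokes rem) :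
    ∃ sid ∈ rem, (pvGetS strokes sid).length ≠ 0 ∧ x = pvItem (pvGetS strokes sid) := by
  rcases List.mem_filterMap.1 hx with ⟨sid, hsid, heq⟩
  by_cases h : (pvGetS strokes sid).length = 0
  · rw [if_pos h] at heq; cases heq
  · rw [if_neg h] at heq
    exact ⟨sid, hsid, h, by cases heq; rfl⟩

-- ---- first-minimal-selection spec of the inner loop ----
def pvSel (strokes : List (List (Int × Int))) : List Int → Option (List Int × Int × List Int)
  | [] => none
  | sid :: rest =>
    if (pvGetS strokes sid).length = 0 then
      (pvSel strokes rest).map (fun r => (sid :: r.1, r.2.1, r.2.2))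
    else
      match pvSel strokes rest with
      | none => some ([], sid, rest)
      | some (as, m, bs) =>
        if pvKeyLT (pvMk strokes m) (pvMk strokes sid) then some (sid :: as, m, bs)
        else some ([], sid, rest)

theorem pvSel_none_empty (strokes : List (List (Int × Int))) :
    ∀ rem, pvSel strokes rem = none → ∀ sid ∈ rem, (pvGetS strokes sid).length = 0 := by
  intro rem
  induction rem with
  | nil => intro _ sid h; simp at h
  | cons s rest ih =>
    intro h sid hmem
    by_cases hs : (pvGetS strokes s).length = 0
    · rw [pvSel, if_pos hs] at h
      have hrest : pvSel strokes rest = none := by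
        cases hr : pvSel strokes rest with
        | none => rfl
        | some r => rw [hr] at h; simp at h
      rcases List.mem_cons.1 hmem with rfl | hmem'
      · exact hs
      · exact ih hrest sid hmem'
    · rw [pvSel, if_neg hs] at h
      cases hr : pvSel strokes rest with
      | none => rw [hr] at h; simp at h
      | some r =>
        obtain ⟨as, m, bs⟩ := r
        rw [hr] at h
        dsimp only at h
        split at h <;> simp at h

theorem pvSel_some (strokes : List (List (Int × Int))) :
    ∀ rem as m bs, pvSel strokes rem = some (as, m, bs) →
      rem = as ++ m :: bs ∧ (pvGetS strokes m).length ≠ 0 ∧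
      (∀ a ∈ as, (pvGetS strokes a).length ≠ 0 → pvKeyLT (pvMk strokes m) (pvMk strokes a) = true) ∧
      (∀ y ∈ rem, (pvGetS strokes y).length ≠ 0 → pvKeyLT (pvMk strokes y) (pvMk strokes m) = false) := by
  intro rem
  induction rem with
  | nil => intro as m bs h; simp [pvSel] at h
  | cons sid rest ih =>
    intro as m bs h
    by_cases hs : (pvGetS strokes sid).length = 0
    · rw [pvSel, if_pos hs] at h
      cases hr : pvSel strokes rest with
      | none => rw [hr] at h; simp at h
      | some r =>
        obtain ⟨as', m', bs'⟩ := r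
        rw [hr] at h
        simp only [Option.map_some] at h
        rw [Option.some_inj] at h
        obtain ⟨h1, h2, h3, h4⟩ := ih as' m' bs' hr
        obtain ⟨ha, hb, hc⟩ : sid :: as' = as ∧ m' = m ∧ bs' = bs :=
          ⟨congrArg Prod.fst h, congrArg (fun t => t.2.1) h, congrArg (fun t => t.2.2) h⟩
        rw [← ha, ← hb, ← hc]
        refine ⟨by rw [h1]; rfl, h2, ?_, ?_⟩
        · intro a ha hane
          rcases List.mem_cons.1 ha with rfl | ha'
          · exact absurd hs hane
          · exact h3 a ha' hane
        · intro y hy hyne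
          rcases List.mem_cons.1 hy with rfl | hy'
          · exact absurd hs hyne
          · exact h4 y hy' hyne
    · rw [pvSel, if_neg hs] at h
      cases hr : pvSel strokes rest with
      | none =>
        rw [hr] at h
        dsimp only at h
        rw [Option.some_inj] at h
        obtain ⟨ha, hb, hc⟩ : ([] : List Int) = as ∧ sid = m ∧ rest = bs :=
          ⟨congrArg Prod.fst h, congrArg (fun t => t.2.1) h, congrArg (fun t => t.2.2) h⟩
        rw [← ha, ← hb, ← hc]
        have hemp := pvSel_none_empty strokes rest hr
        refine ⟨rfl, hs, by intro a ha _; simp at ha, ?_⟩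
        intro y hy hyne
        rcases List.mem_cons.1 hy with rfl | hy'
        · exact pvKeyLT_irrefl _
        · exact absurd (hemp y hy') hyne
      | some r =>
        obtain ⟨as', m', bs'⟩ := r
        rw [hr] at h
        dsimp only at h
        obtain ⟨h1, h2, h3, h4⟩ := ih as' m' bs' hr
        split at h
        · rename_i he
          rw [Option.some_inj] at h
          obtain ⟨ha, hb, hc⟩ : sid :: as' = as ∧ m' = m ∧ bs' = bs :=
            ⟨congrArg Prod.fst h, congrArg (fun t => t.2.1) h, congrArg (fun t => t.2.2) h⟩
          rw [← ha, ← hb, ← hc]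
          refine ⟨by rw [h1]; rfl, h2, ?_, ?_⟩
          · intro a ha hane
            rcases List.mem_cons.1 ha with rfl | ha'
            · exact he
            · exact h3 a ha' hane
          · intro y hy hyne
            rcases List.mem_cons.1 hy with rfl | hy'
            · exact pvKeyLT_asymm he
            · exact h4 y hy' hyne
        · rename_i he
          rw [Option.some_inj] at h
          obtain ⟨ha, hb, hc⟩ : ([] : List Int) = as ∧ sid = m ∧ rest = bs :=
            ⟨congrArg Prod.fst h, congrArg (fun t => t.2.1) h, congrArg (fun t => t.2.2) h⟩
          rw [← ha, ← hb, ← hc]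
          refine ⟨rfl, hs, by intro a ha _; simp at ha, ?_⟩
          intro y hy hyne
          rcases List.mem_cons.1 hy with rfl | hy'
          · exact pvKeyLT_irrefl _
          · by_cases hd : pvKeyLT (pvMk strokes y) (pvMk strokes sid) = true
            · rcases pvKeyLT_total (b := pvMk strokes m') hd with h' | h'
              · rw [h4 y hy' hyne] at h'; cases h'
              · exact absurd h' he
            · simpa using hd

theorem pvInnerA_some (strokes : List (List (Int × Int))) :
    ∀ (rem : List Int) (ridx : Int) (bk : Int × Int) (br : Int) (bst : Bool),
      pvInnerA strokes ridx rem (some (bk, br, bst)) =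
        match pvSel strokes rem with
        | none => some (bk, br, bst)
        | some (as, m, _) =>
          if pvKeyLT (pvMk strokes m) bk then some (pvMk strokes m, ridx + (as.length : Int), pvIsStart strokes m)
          else some (bk, br, bst) := by
  intro rem
  induction rem with
  | nil => intro ridx bk br bst; simp [pvInnerA, pvSel]
  | cons sid rest ih =>
    intro ridx bk br bst
    have harith : ∀ l : Nat, ridx + 1 + (l : Int) = ridx + ((l : Int) + 1) := by intro l; ring
    by_cases hs : (pvGetS strokes sid).length = 0
    · have hsG : (PySem.List.pyGetD strokes sid []).length = 0 := hs
      rw [show pvInnerA strokes ridx (sid :: rest) (some (bk, br, bst)) =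
            pvInnerA strokes (ridx + 1) rest (some (bk, br, bst)) from by
          simp only [pvInnerA]; rw [if_pos hsG]]
      rw [ih, pvSel, if_pos hs]
      rcases hr : pvSel strokes rest with _ | ⟨as, m, bs⟩
      · rfl
      · simp [harith]
    · have hsG : ¬ (PySem.List.pyGetD strokes sid []).length = 0 := hs
      simp only [pvInnerA, pick_key_lefttop]
      rw [if_neg hsG]
      have hk0 : ((PySem.List.pyGetD (PySem.List.pyGetD strokes sid []) 0 (0, 0)).2,
          (PySem.List.pyGetD (PySem.List.pyGetD strokes sid []) 0 (0, 0)).1) = pvK0 (pvGetS strokes sid) := rfl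
      have hk1 : ((PySem.List.pyGetD (PySem.List.pyGetD strokes sid []) (-1) (0, 0)).2,
          (PySem.List.pyGetD (PySem.List.pyGetD strokes sid []) (-1) (0, 0)).1) = pvK1 (pvGetS strokes sid) := rfl
      rw [hk0, hk1]
      set K0 := pvK0 (pvGetS strokes sid) with hK0
      set K1 := pvK1 (pvGetS strokes sid) with hK1
      have hmk : pvMk strokes sid = if pvKeyLT K1 K0 then K1 else K0 := pvMk_eq strokes sid
      have hisS : pvIsStart strokes sid = !pvKeyLT K1 K0 := rfl
      rw [pvSel, if_neg hs]
      by_cases c : pvKeyLT K0 bk <;> by_cases h01 : pvKeyLT K1 K0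
      -- c, h01 : best2 = (K1, ridx, false), and K1 < bk
      · have t1 : pvKeyLT K1 bk = true := pvKeyLT_trans h01 c
        simp only [c, h01, if_true]
        rw [ih]
        rcases hr : pvSel strokes rest with _ | ⟨as, m, bs⟩
        · simp [hmk, h01, hisS, t1]
        · by_cases he : pvKeyLT (pvMk strokes m) K1
          · have hmb : pvKeyLT (pvMk strokes m) bk = true := pvKeyLT_trans he t1
            simp [hmk, h01, he, hmb, harith]
          · simp [hmk, h01, hisS, he, t1]
      -- c, ¬h01 : best2 = (K0, ridx, true)
      · simp only [c, h01, if_true, Bool.false_eq_true, if_false]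
        rw [ih]
        rcases hr : pvSel strokes rest with _ | ⟨as, m, bs⟩
        · simp [hmk, h01, hisS, c]
        · by_cases he : pvKeyLT (pvMk strokes m) K0
          · have hmb : pvKeyLT (pvMk strokes m) bk = true := pvKeyLT_trans he c
            simp [hmk, h01, he, hmb, harith]
          · simp [hmk, h01, hisS, he, c]
      -- ¬c, h01 : best1 = old, best2 = if K1 < bk
      · by_cases d : pvKeyLT K1 bk
        · simp only [c, h01, d, if_true, Bool.false_eq_true, if_false]
          rw [ih]
          rcases hr : pvSel strokes rest with _ | ⟨as, m, bs⟩
          · simp [hmk, h01, hisS, d]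
          · by_cases he : pvKeyLT (pvMk strokes m) K1
            · have hmb : pvKeyLT (pvMk strokes m) bk = true := pvKeyLT_trans he d
              simp [hmk, h01, he, hmb, harith]
            · simp [hmk, h01, hisS, he, d]
        · simp only [c, h01, d, if_true, Bool.false_eq_true, if_false]
          rw [ih]
          rcases hr : pvSel strokes rest with _ | ⟨as, m, bs⟩
          · simp [hmk, h01, hisS, d]
          · by_cases he : pvKeyLT (pvMk strokes m) K1
            · simp only [hmk, h01, if_true, he, harith]
              by_cases f : pvKeyLT (pvMk strokes m) bk <;> simp [f, harith]
            · have hmb : pvKeyLT (pvMk strokes m) bk = false := by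
                by_cases hf : pvKeyLT (pvMk strokes m) bk = true
                · rcases pvKeyLT_total (b := K1) hf with h' | h'
                  · rw [Bool.not_eq_true] at he; rw [he] at h'; cases h'
                  · rw [Bool.not_eq_true] at d; rw [d] at h'; cases h'
                · simpa using hf
              simp [hmk, h01, hisS, he, hmb, d]
      -- ¬c, ¬h01 : best2 = old (K1 < bk impossible)
      · have d : pvKeyLT K1 bk = false := by
          by_cases hf : pvKeyLT K1 bk = true
          · rcases pvKeyLT_total (b := K0) hf with h' | h'
            · rw [Bool.not_eq_true] at h01; rw [h01] at h'; cases h'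
            · rw [Bool.not_eq_true] at c; rw [c] at h'; cases h'
          · simpa using hf
        simp only [c, h01, d, Bool.false_eq_true, if_false]
        rw [ih]
        rcases hr : pvSel strokes rest with _ | ⟨as, m, bs⟩
        · simp [hmk, h01, hisS, c]
        · by_cases he : pvKeyLT (pvMk strokes m) K0
          · simp only [hmk, h01, Bool.false_eq_true, if_false, he, if_true]
            by_cases f : pvKeyLT (pvMk strokes m) bk <;> simp [f, harith]
          · have hmb : pvKeyLT (pvMk strokes m) bk = false := by
              by_cases hf : pvKeyLT (pvMk strokes m) bk = true
              · rcases pvKeyLT_total (b := K0) hf with h' | h'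
                · rw [Bool.not_eq_true] at he; rw [he] at h'; cases h'
                · rw [Bool.not_eq_true] at c; rw [c] at h'; cases h'
              · simpa using hf
            simp [hmk, h01, hisS, he, hmb, c]

theorem pvInnerA_none (strokes : List (List (Int × Int))) :
    ∀ (rem : List Int) (ridx : Int),
      pvInnerA strokes ridx rem none =
        match pvSel strokes rem with
        | none => none
        | some (as, m, _) => some (pvMk strokes m, ridx + (as.length : Int), pvIsStart strokes m) := by
  intro rem
  induction rem with
  | nil => intro ridx; simp [pvInnerA, pvSel]
  | cons sid rest ih =>
    intro ridx
    have harith : ∀ l : Nat, ridx + 1 + (l : Int) = ridx + ((l : Int) + 1) := by intro l; ring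
    by_cases hs : (pvGetS strokes sid).length = 0
    · have hsG : (PySem.List.pyGetD strokes sid []).length = 0 := hs
      rw [show pvInnerA strokes ridx (sid :: rest) none =
            pvInnerA strokes (ridx + 1) rest none from by
          simp only [pvInnerA]; rw [if_pos hsG]]
      rw [ih, pvSel, if_pos hs]
      rcases hr : pvSel strokes rest with _ | ⟨as, m, bs⟩
      · rfl
      · simp [harith]
    · have hsG : ¬ (PySem.List.pyGetD strokes sid []).length = 0 := hs
      simp only [pvInnerA, pick_key_lefttop]
      rw [if_neg hsG]
      have hk0 : ((PySem.List.pyGetD (PySem.List.pyGetD strokes sid []) 0 (0, 0)).2,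
          (PySem.List.pyGetD (PySem.List.pyGetD strokes sid []) 0 (0, 0)).1) = pvK0 (pvGetS strokes sid) := rfl
      have hk1 : ((PySem.List.pyGetD (PySem.List.pyGetD strokes sid []) (-1) (0, 0)).2,
          (PySem.List.pyGetD (PySem.List.pyGetD strokes sid []) (-1) (0, 0)).1) = pvK1 (pvGetS strokes sid) := rfl
      rw [hk0, hk1]
      set K0 := pvK0 (pvGetS strokes sid) with hK0
      set K1 := pvK1 (pvGetS strokes sid) with hK1
      have hmk : pvMk strokes sid = if pvKeyLT K1 K0 then K1 else K0 := pvMk_eq strokes sid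
      have hisS : pvIsStart strokes sid = !pvKeyLT K1 K0 := rfl
      rw [pvSel, if_neg hs]
      by_cases h01 : pvKeyLT K1 K0
      · simp only [h01, if_true]
        rw [pvInnerA_some]
        rcases hr : pvSel strokes rest with _ | ⟨as, m, bs⟩
        · simp [hmk, h01, hisS]
        · by_cases he : pvKeyLT (pvMk strokes m) K1
          · simp [hmk, h01, hisS, he, harith]
          · simp [hmk, h01, hisS, he]
      · simp only [h01, Bool.false_eq_true, if_false]
        rw [pvInnerA_some]
        rcases hr : pvSel strokes rest with _ | ⟨as, m, bs⟩
        · simp [hmk, h01, hisS]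
        · by_cases he : pvKeyLT (pvMk strokes m) K0
          · simp [hmk, h01, hisS, he, harith]
          · simp [hmk, h01, hisS, he]

theorem pv_getElem_append (as : List Int) (m : Int) (bs : List Int)
    (h : as.length < (as ++ m :: bs).length) : (as ++ m :: bs)[as.length] = m := by
  induction as with
  | nil => rfl
  | cons a as ih => simpa using ih (by simpa using h)

theorem pv_eraseIdx_append (as : List Int) (m : Int) (bs : List Int) :
    (as ++ m :: bs).eraseIdx as.length = as ++ bs := by
  induction as with
  | nil => rfl
  | cons a as ih => simpa using ih

theorem pvLoopA_eq (strokes : List (List (Int × Int))) :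
    ∀ (n : Nat) (rem : List Int), rem.length ≤ n → ∀ ordered,
      pvLoopA strokes rem ordered = ordered ++ (pvSort (pvKeyed strokes rem)).map (fun t => t.2) := by
  intro n
  induction n with
  | zero =>
    intro rem hlen ordered
    have : rem = [] := List.eq_nil_of_length_eq_zero (Nat.le_zero.1 hlen)
    subst this
    rw [pvLoopA]
    simp [pvKeyed, pvSort]
  | succ n ihn =>
    intro rem hlen ordered
    rw [pvLoopA]
    by_cases h0 : rem.length = 0
    · rw [if_pos h0]
      have : rem = [] := List.eq_nil_of_length_eq_zero h0
      subst this
      simp [pvKeyed, pvSort]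
    · rw [if_neg h0, pvInnerA_none]
      rcases hr : pvSel strokes rem with _ | ⟨as, m, bs⟩
      · have hemp := pvSel_none_empty strokes rem hr
        have hk : pvKeyed strokes rem = [] := by
          simp only [pvKeyed, List.filterMap_eq_nil_iff]
          intro sid hsid
          simp [hemp sid hsid]
        simp [hk, pvSort]
      · obtain ⟨hrem, hm, has, hall⟩ := pvSel_some strokes rem as m bs hr
        have hlt : as.length < rem.length := by rw [hrem]; simp
        have hget : PySem.List.pyGetD rem (0 + ((as.length : Nat) : Int)) 0 = m := by
          rw [zero_add, PySem.List.pyGetD_natCast, hrem]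
          rw [List.getD_eq_getElem?_getD, List.getElem?_append_right (Nat.le_refl _)]
          simp
        have hpop : PySem.List.pop? rem (0 + ((as.length : Nat) : Int)) = some (m, as ++ bs) := by
          rw [zero_add, hrem, PySem.List.pop?_natCast _ _ (by simp)]
          congr 1
          exact Prod.ext (pv_getElem_append as m bs (by simp)) (pv_eraseIdx_append as m bs)
        have hornt : (if pvIsStart strokes m = true then PySem.List.pyGetD strokes m []
              else (PySem.List.slice? (PySem.List.pyGetD strokes m []) none none (-1)).getD []) =
            (pvItem (pvGetS strokes m)).2 := by
          rw [pvItem_snd]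
          unfold pvIsStart pvRev pvGetS
          by_cases hx : pvKeyLT (pvK1 (PySem.List.pyGetD strokes m [])) (pvK0 (PySem.List.pyGetD strokes m [])) <;>
            simp [hx]
        have hrec : pvLoopA strokes (as ++ bs) (ordered ++ [(pvItem (pvGetS strokes m)).2]) =
            (ordered ++ [(pvItem (pvGetS strokes m)).2]) ++ (pvSort (pvKeyed strokes (as ++ bs))).map (fun t => t.2) := by
          apply ihn
          rw [hrem] at hlen; simp at hlen ⊢; omega
        have hsel : pvSort (pvKeyed strokes rem) = pvItem (pvGetS strokes m) :: pvSort (pvKeyed strokes (as ++ bs)) := by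
          rw [hrem, pvKeyed_append, pvKeyed_cons_ne strokes m bs hm]
          have h1 : ∀ x ∈ pvKeyed strokes as, pvBefore (pvItem (pvGetS strokes m)) x = true := by
            intro x hx
            obtain ⟨sid, hsid, hne, rfl⟩ := pvKeyed_mem strokes as x hx
            exact has sid hsid hne
          have h2 : ∀ y ∈ pvKeyed strokes bs, pvBefore y (pvItem (pvGetS strokes m)) = false := by
            intro y hy
            obtain ⟨sid, hsid, hne, rfl⟩ := pvKeyed_mem strokes bs y hy
            exact hall sid (by rw [hrem]; exact List.mem_append_right _ (List.mem_cons_of_mem _ hsid)) hne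
          rw [pvSort, pvSort, pv_sort_sel pvBefore _ _ _ h1 h2, pvKeyed_append]
        dsimp only
        rw [hget, hpop]
        dsimp only
        rw [hornt, hrec, hsel]
        simp

theorem pvFoldB (l : List (List (Int × Int))) :
    ∀ acc, l.foldl (fun acc st =>
      if st.length = 0 then acc
      else
        if pvKeyLT ((PySem.List.pyGetD st (-1) (0, 0)).2, (PySem.List.pyGetD st (-1) (0, 0)).1)
            ((PySem.List.pyGetD st 0 (0, 0)).2, (PySem.List.pyGetD st 0 (0, 0)).1)
        then acc ++ [(((PySem.List.pyGetD st (-1) (0, 0)).2, (PySem.List.pyGetD st (-1) (0, 0)).1), (PySem.List.slice? st none none (-1)).getD [])]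
        else acc ++ [(((PySem.List.pyGetD st 0 (0, 0)).2, (PySem.List.pyGetD st 0 (0, 0)).1), st)]) acc
      = acc ++ l.filterMap (fun st => if st.length = 0 then none else some (pvItem st)) := by
  induction l with
  | nil => intro acc; simp
  | cons st l ih =>
    intro acc
    simp only [List.foldl_cons]
    by_cases h : st.length = 0
    · rw [if_pos h, ih, List.filterMap_cons_none (by show (if st.length = 0 then none else some (pvItem st)) = none; rw [if_pos h])]
    · rw [if_neg h, ih, List.filterMap_cons_some (f := fun st => if st.length = 0 then none else some (pvItem st))
        (b := pvItem st) (by show (if st.length = 0 then none else some (pvItem st)) = some (pvItem st); rw [if_neg h])]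
      by_cases h01 : pvKeyLT ((PySem.List.pyGetD st (-1) (0, 0)).2, (PySem.List.pyGetD st (-1) (0, 0)).1)
          ((PySem.List.pyGetD st 0 (0, 0)).2, (PySem.List.pyGetD st 0 (0, 0)).1) = true
      · simp [h01, pvItem, pvK0, pvK1, pvRev]
      · simp [h01, pvItem, pvK0, pvK1, pvRev]

theorem pvAlt_eq (strokes : List (List (Int × Int))) :
    order_strokes_by_lefttop_endpoints_alt strokes =
      (pvSort (pvKeyed strokes (PySem.List.pyRange 0 strokes.length 1))).map (fun t => t.2) := by
  have hbefore : (fun (a b : (Int × Int) × List (Int × Int)) =>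
      decide (a.1.1 < b.1.1) || (!decide (b.1.1 < a.1.1) && decide (a.1.2 < b.1.2))) = pvBefore := by
    funext a b
    by_cases h1 : a.1.1 < b.1.1 <;> by_cases h2 : b.1.1 < a.1.1 <;> by_cases h3 : a.1.2 < b.1.2 <;>
      simp [pvBefore, pvKeyLT, h1, h2, h3] <;> omega
  have hkeyed : (strokes.filterMap fun st => if st.length = 0 then none else some (pvItem st)) =
      pvKeyed strokes (PySem.List.pyRange 0 strokes.length 1) := by
    conv_lhs => rw [← PySem.List.map_pyGetD_pyRange_zero strokes []]
    rw [List.filterMap_map]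
    rfl
  unfold order_strokes_by_lefttop_endpoints_alt
  rw [pvFoldB strokes [], List.nil_append, hkeyed]
  congr 1
  unfold PySem.List.sorted2
  simp only [Bool.false_eq_true, if_false]
  rw [hbefore]
  rfl

-- ===== VERDICT (by name: the statement is the Claim_ definition above) =====
theorem order_strokes_by_lefttop_endpoints_spec : Claim_equal_order_strokes_by_lefttop_endpoints := by
  intro strokes _
  unfold Spec_order_strokes_by_lefttop_endpoints
  rw [order_strokes_by_lefttop_endpoints, pvAlt_eq,
    pvLoopA_eq strokes (PySem.List.pyRange 0 strokes.length 1).length _ le_rfl]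
  simp
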